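-- pv_equiv track=rewrite | github.com/yegors/PhaserRadarLabs | tools/read_pdf.py | parse_page_spec
-- ===== SOURCE A (Python) =====
-- def parse_page_spec(spec, max_page):
--     """Parse page specification string into a list of 0-based page numbers.
--
--     Supports: "5" (single), "1-10" (range), "1,3,7" (list), "1-3,7,10-12" (mixed).
--     Input is 1-based, output is 0-based.
--     """
--     pages = set()
--     for part in spec.split(','):
--         part = part.strip()
--         if '-' in part:
--             start, end = part.split('-', 1)
--             start = max(1, int(start))
--             end = min(max_page, int(end))
--             pages.update(range(start - 1, end))
--         else:
--             p = int(part) - 1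
--             if 0 <= p < max_page:
--                 pages.add(p)
--     return sorted(pages)
-- ===== SOURCE B (Python) =====
-- def parse_page_spec(spec, max_page):
--     """Parse page specification string into a list of 0-based page numbers.
--
--     Same contract as A, but via interval sweeping: each part becomes a
--     half-open 0-based interval, the non-empty intervals are sorted by left
--     endpoint and swept once, merging overlaps and emitting pages in order
--     (sorted and deduplicated by construction, with no set and no final sort).
--     """
--     ivs = []
--     for part in spec.split(','):
--         part = part.strip()
--         if '-' in part:
--             start, end = part.split('-', 1)
--             ivs.append((max(1, int(start)) - 1, min(max_page, int(end))))
--         else: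
--             p = int(part) - 1
--             if 0 <= p < max_page:
--                 ivs.append((p, p + 1))
--     ivs = sorted((iv for iv in ivs if iv[0] < iv[1]), key=lambda iv: iv[0])
--     out = []
--     cur = None
--     for lo, hi in ivs:
--         if cur is None:
--             cur = (lo, hi)
--         elif lo <= cur[1]:
--             if hi > cur[1]:
--                 cur = (cur[0], hi)
--         else:
--             out.extend(range(cur[0], cur[1]))
--             cur = (lo, hi)
--     if cur is not None:
--         out.extend(range(cur[0], cur[1]))
--     return out
-- ===== Notes on version B (the rewrite author's own statement) =====
-- stated objective: alternative
-- what changed: Replaces the accumulate-into-a-set-then-sort algorithm by an interval sweep: each part is turned into a half-open interval, non-empty intervals are sorted by left endpoint and merged in one sweep that emits pages in increasing order, so no set and no sort of pages is ever built.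
import Mathlib
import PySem

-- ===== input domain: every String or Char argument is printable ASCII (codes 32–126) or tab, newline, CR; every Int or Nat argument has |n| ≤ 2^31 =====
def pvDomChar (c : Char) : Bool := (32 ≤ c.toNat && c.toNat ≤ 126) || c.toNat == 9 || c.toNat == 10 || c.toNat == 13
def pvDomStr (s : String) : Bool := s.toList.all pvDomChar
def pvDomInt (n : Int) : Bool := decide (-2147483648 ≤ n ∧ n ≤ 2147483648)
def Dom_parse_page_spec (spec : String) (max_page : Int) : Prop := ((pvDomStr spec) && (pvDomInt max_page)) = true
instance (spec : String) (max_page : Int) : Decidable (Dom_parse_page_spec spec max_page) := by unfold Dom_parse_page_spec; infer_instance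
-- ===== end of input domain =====

-- B replaces A's set-accumulate-then-sort by an interval sweep: each part becomes a
-- half-open interval, the non-empty intervals are sorted by left endpoint and merged
-- in one sweep that emits pages in increasing order (alternative algorithm; same results).

-- ===== PORT A =====
-- one loop step of A: process one comma-separated part, updating the set of pages
def pvStepA (max_page : Int) (pages : PySem.Set Int) (part0 : String) : PySem.Set Int :=
  let part := PySem.Str.strip part0
  if PySem.Str.isIn "-" part then
    let pieces := (PySem.Str.splitMax? part "-" 1).getD []
    -- 'start, end = part.split('-', 1)': with '-' in part this is exactly two pieces
    let start := max 1 ((PySem.Int.ofStr? (pieces.getD 0 "")).getD 0)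
    let stop  := min max_page ((PySem.Int.ofStr? (pieces.getD 1 "")).getD 0)
    PySem.Set.update pages (PySem.List.pyRange (start - 1) stop 1)
  else
    let p := (PySem.Int.ofStr? part).getD 0 - 1
    if 0 ≤ p ∧ p < max_page then PySem.Set.add pages p else pages

def parse_page_spec (spec : String) (max_page : Int) : List Int :=
  let pages := ((PySem.Str.split? spec ",").getD []).foldl (pvStepA max_page) PySem.Set.empty
  PySem.List.sorted pages (fun x => x) false

-- ===== PORT B =====
-- phase-1 loop step of B: append this part's half-open 0-based interval (if any)
def pvStepIv (max_page : Int) (ivs : List (Int × Int)) (part0 : String) : List (Int × Int) :=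
  let part := PySem.Str.strip part0
  if PySem.Str.isIn "-" part then
    let pieces := (PySem.Str.splitMax? part "-" 1).getD []
    ivs ++ [(max 1 ((PySem.Int.ofStr? (pieces.getD 0 "")).getD 0) - 1,
             min max_page ((PySem.Int.ofStr? (pieces.getD 1 "")).getD 0))]
  else
    let p := (PySem.Int.ofStr? part).getD 0 - 1
    if 0 ≤ p ∧ p < max_page then ivs ++ [(p, p + 1)] else ivs

-- phase-3 trailing flush of B: Python's "if cur is not None: out.extend(range(*cur))"
def pvFinish (st : List Int × Option (Int × Int)) : List Int :=
  match st.2 with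
  | some (clo, chi) => st.1 ++ PySem.List.pyRange clo chi 1
  | none => st.1

-- phase-3 loop step of B: sweep state is (out, cur); Python's 'cur = None' is none
def pvSweep (st : List Int × Option (Int × Int)) (iv : Int × Int) : List Int × Option (Int × Int) :=
  match st.2 with
  | none => (st.1, some iv)
  | some (clo, chi) =>
    if iv.1 ≤ chi then
      if chi < iv.2 then (st.1, some (clo, iv.2)) else (st.1, some (clo, chi))
    else (st.1 ++ PySem.List.pyRange clo chi 1, some iv)

def parse_page_spec_alt (spec : String) (max_page : Int) : List Int :=
  let ivs0 := ((PySem.Str.split? spec ",").getD []).foldl (pvStepIv max_page) []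
  let ivs := PySem.List.sorted (ivs0.filter (fun iv => iv.1 < iv.2)) (fun iv => iv.1) false
  pvFinish (ivs.foldl pvSweep ([], none))

-- ===== PRECONDITION & SPEC =====
-- Pre_ excludes exactly the inputs on which A raises ValueError: some comma-separated
-- part whose int() conversion fails (empty, non-numeric, or a malformed range piece).
def Pre_parse_page_spec (spec : String) (max_page : Int) : Prop :=
  ∀ part ∈ (PySem.Str.split? spec ",").getD [],
    let t := PySem.Str.strip part
    if PySem.Str.isIn "-" t then
      let pieces := (PySem.Str.splitMax? t "-" 1).getD []
      (PySem.Int.ofStr? (pieces.getD 0 "")).isSome = true ∧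
      (PySem.Int.ofStr? (pieces.getD 1 "")).isSome = true
    else (PySem.Int.ofStr? t).isSome = true
instance (spec : String) (max_page : Int) : Decidable (Pre_parse_page_spec spec max_page) := by
  unfold Pre_parse_page_spec; infer_instance

def pvWitness_parse_page_spec : String × Int := ("1-3, 7,10-12", 11)

def Spec_parse_page_spec (spec : String) (max_page : Int) (out : List Int) : Prop := out = parse_page_spec_alt spec max_page
instance (spec : String) (max_page : Int) (out : List Int) : Decidable (Spec_parse_page_spec spec max_page out) := by unfold Spec_parse_page_spec; infer_instance

-- ===== CLAIM (what is proved, stated in full; the proofs are below) =====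
def Claim_equal_parse_page_spec : Prop := ∀ (spec : String) (max_page : Int), Dom_parse_page_spec spec max_page → Pre_parse_page_spec spec max_page → Spec_parse_page_spec spec max_page (parse_page_spec spec max_page)

-- ===== LEMMAS AND PROOFS =====

-- the list of 0-based page indices a single part contributes (A's view)
def pvContrib (max_page : Int) (part0 : String) : List Int :=
  let part := PySem.Str.strip part0
  if PySem.Str.isIn "-" part then
    let pieces := (PySem.Str.splitMax? part "-" 1).getD []
    let lo := max 1 ((PySem.Int.ofStr? (pieces.getD 0 "")).getD 0) - 1
    let hi := min max_page ((PySem.Int.ofStr? (pieces.getD 1 "")).getD 0)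
    PySem.List.pyRange lo hi 1
  else
    let p := (PySem.Int.ofStr? part).getD 0 - 1
    if 0 ≤ p ∧ p < max_page then [p] else []

-- the (zero or one) intervals a single part contributes (B's view)
def pvIvOf (max_page : Int) (part0 : String) : List (Int × Int) :=
  let part := PySem.Str.strip part0
  if PySem.Str.isIn "-" part then
    let pieces := (PySem.Str.splitMax? part "-" 1).getD []
    [(max 1 ((PySem.Int.ofStr? (pieces.getD 0 "")).getD 0) - 1,
      min max_page ((PySem.Int.ofStr? (pieces.getD 1 "")).getD 0))]
  else
    let p := (PySem.Int.ofStr? part).getD 0 - 1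
    if 0 ≤ p ∧ p < max_page then [(p, p + 1)] else []

-- membership in a union of half-open intervals
def pvUMem (ivs : List (Int × Int)) (x : Int) : Prop := ∃ iv ∈ ivs, iv.1 ≤ x ∧ x < iv.2

lemma pvStepA_eq (max_page : Int) (pages : PySem.Set Int) (part0 : String) :
    pvStepA max_page pages part0 = PySem.Set.update pages (pvContrib max_page part0) := by
  simp only [pvStepA, pvContrib]
  by_cases h : PySem.Str.isIn "-" (PySem.Str.strip part0) = true
  · rw [if_pos h, if_pos h]
  · rw [if_neg h, if_neg h]
    split_ifs with hc
    · rw [PySem.Set.update_cons, PySem.Set.update_nil]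
    · rw [PySem.Set.update_nil]

lemma pvStepIv_eq (max_page : Int) (ivs : List (Int × Int)) (part0 : String) :
    pvStepIv max_page ivs part0 = ivs ++ pvIvOf max_page part0 := by
  simp only [pvStepIv, pvIvOf]
  by_cases h : PySem.Str.isIn "-" (PySem.Str.strip part0) = true
  · rw [if_pos h, if_pos h]
  · rw [if_neg h, if_neg h]
    split_ifs with hc
    · rfl
    · simp

lemma pvSingle_mem (p mp x : Int) :
    x ∈ (if 0 ≤ p ∧ p < mp then [p] else []) ↔
      pvUMem (if 0 ≤ p ∧ p < mp then [(p, p + 1)] else []) x := by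
  unfold pvUMem
  split_ifs with hc
  · simp only [List.mem_singleton]
    constructor
    · rintro rfl
      exact ⟨_, rfl, le_refl _, by omega⟩
    · rintro ⟨iv, rfl, h1, h2⟩
      omega
  · simp

lemma pvRange_mem (lo hi x : Int) :
    x ∈ PySem.List.pyRange lo hi 1 ↔ pvUMem [(lo, hi)] x := by
  unfold pvUMem
  simp [PySem.List.mem_pyRange_one]

lemma pvContrib_mem (max_page : Int) (part0 : String) (x : Int) :
    x ∈ pvContrib max_page part0 ↔ pvUMem (pvIvOf max_page part0) x := by
  unfold pvContrib pvIvOf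
  by_cases h : PySem.Str.isIn "-" (PySem.Str.strip part0) = true
  · rw [if_pos h, if_pos h]
    exact pvRange_mem _ _ _
  · rw [if_neg h, if_neg h]
    exact pvSingle_mem _ _ _

-- A's accumulated set: membership characterisation
lemma pvFoldA_mem (max_page : Int) (parts : List String) (S : PySem.Set Int) (x : Int) :
    x ∈ parts.foldl (pvStepA max_page) S ↔ x ∈ S ∨ ∃ p ∈ parts, x ∈ pvContrib max_page p := by
  induction parts generalizing S with
  | nil => simp
  | cons p ps ih =>
    rw [List.foldl_cons, pvStepA_eq, ih]
    rw [PySem.Set.mem_update]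
    constructor
    · rintro (( h | h ) | h)
      · exact Or.inl h
      · exact Or.inr ⟨p, by simp, h⟩
      · obtain ⟨q, hq, hx⟩ := h; exact Or.inr ⟨q, by simp [hq], hx⟩
    · rintro (h | ⟨q, hq, hx⟩)
      · exact Or.inl (Or.inl h)
      · rcases List.mem_cons.mp hq with rfl | hq
        · exact Or.inl (Or.inr hx)
        · exact Or.inr ⟨q, hq, hx⟩

-- A's accumulated set stays duplicate-free
lemma pvFoldA_nodup (max_page : Int) (parts : List String) (S : PySem.Set Int)
    (h : S.Nodup) : (parts.foldl (pvStepA max_page) S).Nodup := by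
  induction parts generalizing S with
  | nil => exact h
  | cons p ps ih =>
    rw [List.foldl_cons, pvStepA_eq]
    exact ih _ (PySem.Set.nodup_update _ _ h)

-- B's phase-1 fold is concatenation of the per-part intervals
lemma pvFoldIv_eq (max_page : Int) (parts : List String) (acc : List (Int × Int)) :
    parts.foldl (pvStepIv max_page) acc = acc ++ parts.flatMap (pvIvOf max_page) := by
  induction parts generalizing acc with
  | nil => simp
  | cons p ps ih => rw [List.foldl_cons, pvStepIv_eq, ih]; simp

lemma pvUMem_filter (ivs : List (Int × Int)) (x : Int) :
    pvUMem (ivs.filter (fun iv => iv.1 < iv.2)) x ↔ pvUMem ivs x := by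
  simp only [pvUMem, List.mem_filter]
  constructor
  · rintro ⟨iv, ⟨hiv, _⟩, hx⟩; exact ⟨iv, hiv, hx⟩
  · rintro ⟨iv, hiv, hx⟩; exact ⟨iv, ⟨hiv, by simp; omega⟩, hx⟩

lemma pvUMem_perm {ivs ivs' : List (Int × Int)} (h : ivs.Perm ivs') (x : Int) :
    pvUMem ivs x ↔ pvUMem ivs' x := by
  simp only [pvUMem]
  constructor
  · rintro ⟨iv, hiv, hx⟩; exact ⟨iv, h.mem_iff.mp hiv, hx⟩
  · rintro ⟨iv, hiv, hx⟩; exact ⟨iv, h.mem_iff.mpr hiv, hx⟩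

-- the sweep invariant: given sorted non-empty intervals not starting before cur,
-- the finished output is strictly increasing and covers exactly out ∪ cur ∪ the union
lemma pvSweep_go (ivs : List (Int × Int)) (out : List Int) (clo chi : Int)
    (hcur : clo < chi)
    (hout : out.Pairwise (· < ·))
    (houtlt : ∀ y ∈ out, y < clo)
    (hne : ∀ iv ∈ ivs, iv.1 < iv.2)
    (hge : ∀ iv ∈ ivs, clo ≤ iv.1)
    (hsorted : ivs.Pairwise (fun a b => a.1 ≤ b.1)) :
    (pvFinish (ivs.foldl pvSweep (out, some (clo, chi)))).Pairwise (· < ·) ∧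
    ∀ x, x ∈ pvFinish (ivs.foldl pvSweep (out, some (clo, chi))) ↔
      (x ∈ out ∨ (clo ≤ x ∧ x < chi) ∨ pvUMem ivs x) := by
  induction ivs generalizing out clo chi with
  | nil =>
    simp only [List.foldl_nil, pvFinish]
    constructor
    · rw [List.pairwise_append]
      exact ⟨hout, PySem.List.pairwise_lt_pyRange_one clo chi, by
        intro a ha b hb
        have := houtlt a ha
        rw [PySem.List.mem_pyRange_one] at hb
        omega⟩
    · intro x
      simp [PySem.List.mem_pyRange_one, pvUMem]
  | cons iv tl ih =>
    obtain ⟨lo, hi⟩ := iv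
    have hlohi : lo < hi := hne (lo, hi) (by simp)
    have hclo : clo ≤ lo := hge (lo, hi) (by simp)
    have htlge : ∀ jv ∈ tl, lo ≤ jv.1 := by
      intro jv hjv; exact (List.pairwise_cons.mp hsorted).1 jv hjv
    have htlne : ∀ jv ∈ tl, jv.1 < jv.2 := fun jv hjv => hne jv (by simp [hjv])
    have htlsorted : tl.Pairwise (fun a b => a.1 ≤ b.1) := (List.pairwise_cons.mp hsorted).2
    rw [List.foldl_cons]
    by_cases hov : lo ≤ chi
    · by_cases hext : chi < hi
      · have hstep : pvSweep (out, some (clo, chi)) (lo, hi) = (out, some (clo, hi)) := by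
          simp [pvSweep, hov, hext]
        rw [hstep]
        obtain ⟨hp, hm⟩ := ih out clo hi (by omega) hout houtlt htlne
          (fun jv hjv => le_trans hclo (htlge jv hjv)) htlsorted
        refine ⟨hp, fun x => ?_⟩
        rw [hm x]
        constructor
        · rintro (h | h | h)
          · exact Or.inl h
          · by_cases hx : x < chi
            · exact Or.inr (Or.inl ⟨h.1, hx⟩)
            · exact Or.inr (Or.inr ⟨(lo, hi), by simp, by simp; omega⟩)
          · exact Or.inr (Or.inr ⟨h.choose, by simp [h.choose_spec.1], h.choose_spec.2⟩)
        · rintro (h | h | ⟨jv, hjv, hx⟩)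
          · exact Or.inl h
          · exact Or.inr (Or.inl ⟨h.1, by omega⟩)
          · rcases List.mem_cons.mp hjv with rfl | hjv
            · simp at hx; exact Or.inr (Or.inl (by omega))
            · exact Or.inr (Or.inr ⟨jv, hjv, hx⟩)
      · have hstep : pvSweep (out, some (clo, chi)) (lo, hi) = (out, some (clo, chi)) := by
          simp [pvSweep, hov, hext]
        rw [hstep]
        obtain ⟨hp, hm⟩ := ih out clo chi hcur hout houtlt htlne
          (fun jv hjv => le_trans hclo (htlge jv hjv)) htlsorted
        refine ⟨hp, fun x => ?_⟩
        rw [hm x]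
        constructor
        · rintro (h | h | ⟨jv, hjv, hx⟩)
          · exact Or.inl h
          · exact Or.inr (Or.inl h)
          · exact Or.inr (Or.inr ⟨jv, by simp [hjv], hx⟩)
        · rintro (h | h | ⟨jv, hjv, hx⟩)
          · exact Or.inl h
          · exact Or.inr (Or.inl h)
          · rcases List.mem_cons.mp hjv with rfl | hjv
            · simp at hx; exact Or.inr (Or.inl (by omega))
            · exact Or.inr (Or.inr ⟨jv, hjv, hx⟩)
    · have hstep : pvSweep (out, some (clo, chi)) (lo, hi) =
          (out ++ PySem.List.pyRange clo chi 1, some (lo, hi)) := by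
        simp [pvSweep, hov]
      rw [hstep]
      have hout' : (out ++ PySem.List.pyRange clo chi 1).Pairwise (· < ·) := by
        rw [List.pairwise_append]
        exact ⟨hout, PySem.List.pairwise_lt_pyRange_one clo chi, by
          intro a ha b hb
          have := houtlt a ha
          rw [PySem.List.mem_pyRange_one] at hb
          omega⟩
      have houtlt' : ∀ y ∈ out ++ PySem.List.pyRange clo chi 1, y < lo := by
        intro y hy
        rcases List.mem_append.mp hy with hy | hy
        · have := houtlt y hy; omega
        · rw [PySem.List.mem_pyRange_one] at hy; omega
      obtain ⟨hp, hm⟩ := ih (out ++ PySem.List.pyRange clo chi 1) lo hi hlohi hout' houtlt'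
        htlne htlge htlsorted
      refine ⟨hp, fun x => ?_⟩
      rw [hm x]
      constructor
      · rintro (h | h | ⟨jv, hjv, hx⟩)
        · rcases List.mem_append.mp h with h | h
          · exact Or.inl h
          · rw [PySem.List.mem_pyRange_one] at h; exact Or.inr (Or.inl h)
        · exact Or.inr (Or.inr ⟨(lo, hi), by simp, by simpa using h⟩)
        · exact Or.inr (Or.inr ⟨jv, by simp [hjv], hx⟩)
      · rintro (h | h | ⟨jv, hjv, hx⟩)
        · exact Or.inl (List.mem_append.mpr (Or.inl h))
        · exact Or.inl (List.mem_append.mpr (Or.inr (by rw [PySem.List.mem_pyRange_one]; exact h)))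
        · rcases List.mem_cons.mp hjv with rfl | hjv
          · exact Or.inr (Or.inl hx)
          · exact Or.inr (Or.inr ⟨jv, hjv, hx⟩)

-- the core: a duplicate-free set with the same members as the union of sorted
-- non-empty intervals sorts to exactly the sweep's output
lemma pvMain (S : PySem.Set Int) (ivs : List (Int × Int))
    (hSnodup : S.Nodup)
    (hmemS : ∀ x, x ∈ S ↔ pvUMem ivs x)
    (hivne : ∀ iv ∈ ivs, iv.1 < iv.2)
    (hivsorted : ivs.Pairwise (fun a b => a.1 ≤ b.1)) :
    PySem.List.sorted S (fun x => x) false = pvFinish (ivs.foldl pvSweep ([], none)) := by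
  cases ivs with
  | nil =>
    have hSnil : S = [] := by
      apply List.eq_nil_iff_forall_not_mem.mpr
      intro x hx
      obtain ⟨iv, hiv, _⟩ := (hmemS x).mp hx
      simp at hiv
    simp only [List.foldl_nil, pvFinish, hSnil]
    exact (PySem.List.sorted_eq_nil_iff _ _ _).mpr rfl
  | cons iv tl =>
    obtain ⟨lo, hi'⟩ := iv
    have hlohi : lo < hi' := hivne (lo, hi') (by simp)
    have h1 : ((lo, hi') :: tl).foldl pvSweep ([], none) =
        tl.foldl pvSweep ([], some (lo, hi')) := by
      rw [List.foldl_cons]; rfl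
    obtain ⟨hp, hm⟩ := pvSweep_go tl [] lo hi' hlohi List.Pairwise.nil (by simp)
      (fun jv hjv => hivne jv (by simp [hjv]))
      (fun jv hjv => (List.pairwise_cons.mp hivsorted).1 jv hjv)
      (List.pairwise_cons.mp hivsorted).2
    have hres : ∀ x, x ∈ pvFinish (tl.foldl pvSweep ([], some (lo, hi'))) ↔ x ∈ S := by
      intro x
      rw [hm x, hmemS x]
      simp only [List.not_mem_nil, false_or, pvUMem]
      constructor
      · rintro (h | ⟨jv, hjv, hx⟩)
        · exact ⟨(lo, hi'), by simp, h⟩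
        · exact ⟨jv, by simp [hjv], hx⟩
      · rintro ⟨jv, hjv, hx⟩
        rcases List.mem_cons.mp hjv with rfl | hjv
        · exact Or.inl hx
        · exact Or.inr ⟨jv, hjv, hx⟩
    have hndres : (pvFinish (tl.foldl pvSweep ([], some (lo, hi')))).Nodup :=
      hp.imp (fun h => ne_of_lt h)
    have hpermres : (pvFinish (tl.foldl pvSweep ([], some (lo, hi')))).Perm S :=
      (List.perm_ext_iff_of_nodup hndres hSnodup).mpr hres
    rw [h1]
    exact PySem.List.sorted_eq_of_perm_of_pairwise_lt S _ (fun x => x) hpermres hp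

-- ===== VERDICT (by name: the statement is the Claim_ definition above) =====
theorem parse_page_spec_spec : Claim_equal_parse_page_spec := by
  intro spec max_page _ _
  unfold Spec_parse_page_spec parse_page_spec parse_page_spec_alt
  refine pvMain _ _ ?_ ?_ ?_ ?_
  · exact pvFoldA_nodup max_page _ _ List.nodup_nil
  · intro x
    have hperm := PySem.List.sorted_perm
      (((((PySem.Str.split? spec ",").getD []).foldl (pvStepIv max_page) []).filter
        (fun iv => iv.1 < iv.2))) (fun iv : Int × Int => iv.1) false
    rw [pvFoldA_mem, pvUMem_perm hperm, pvUMem_filter, pvFoldIv_eq]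
    simp only [List.nil_append, PySem.Set.empty]
    constructor
    · rintro (h | ⟨p, hp, hx⟩)
      · simp at h
      · obtain ⟨iv, hiv, hx'⟩ := (pvContrib_mem max_page p x).mp hx
        exact ⟨iv, List.mem_flatMap.mpr ⟨p, hp, hiv⟩, hx'⟩
    · rintro ⟨iv, hiv, hx⟩
      obtain ⟨p, hp, hiv'⟩ := List.mem_flatMap.mp hiv
      exact Or.inr ⟨p, hp, (pvContrib_mem max_page p x).mpr ⟨iv, hiv', hx⟩⟩
  · intro iv hiv
    rw [PySem.List.mem_sorted] at hiv
    have := (List.mem_filter.mp hiv).2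
    simpa using this
  · exact PySem.List.sorted_pairwise _ _
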